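-- pv_equiv track=rewrite | github.com/jwalin-shah/inbox | services.py | _escape_applescript
-- ===== SOURCE A (Python) =====
-- def _escape_applescript(text: str) -> str:
--     if not text:
--         return '""'
--
--     replacements = {
--         '"': "quote",
--         "\\": "ASCII character 92",
--         "{": "ASCII character 123",
--         "}": "ASCII character 125",
--         "\n": "ASCII character 10",
--         "\r": "ASCII character 13",
--         "\t": "ASCII character 9",
--     }
--     parts: list[str] = []
--     literal: list[str] = []
--
--     def flush_literal() -> None:
--         if literal:
--             parts.append(f'"{"".join(literal)}"')
--             literal.clear()
--
--     for char in text: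
--         replacement = replacements.get(char)
--         if replacement is not None:
--             flush_literal()
--             parts.append(replacement)
--         elif ord(char) < 32:
--             flush_literal()
--             parts.append(f"ASCII character {ord(char)}")
--         else:
--             literal.append(char)
--
--     flush_literal()
--     return " & ".join(parts) if parts else '""'
-- ===== SOURCE B (Python) =====
-- def _escape_applescript(text: str) -> str:
--     special = {
--         '"': "quote",
--         "\\": "ASCII character 92",
--         "{": "ASCII character 123",
--         "}": "ASCII character 125",
--         "\n": "ASCII character 10",
--         "\r": "ASCII character 13",
--         "\t": "ASCII character 9",
--     }
--     parts: list[str] = []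
--     i, n = 0, len(text)
--     while i < n:
--         c = text[i]
--         if c in special:
--             parts.append(special[c])
--             i += 1
--         elif ord(c) < 32:
--             parts.append(f"ASCII character {ord(c)}")
--             i += 1
--         else:
--             j = i + 1
--             while j < n and text[j] not in special and ord(text[j]) >= 32:
--                 j += 1
--             parts.append(f'"{text[i:j]}"')
--             i = j
--     return " & ".join(parts) if parts else '""'
-- ===== Notes on version B (the rewrite author's own statement) =====
-- stated objective: alternative
-- what changed: Replaces A's flush-accumulator state machine (pending literal buffer flushed before each special token and at the end) with a two-pointer span scan that, on meeting a literal character, advances a second index past the whole maximal literal run and emits it as one quoted slice, so no mutable literal buffer or flush helper exists.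
import Mathlib
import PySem

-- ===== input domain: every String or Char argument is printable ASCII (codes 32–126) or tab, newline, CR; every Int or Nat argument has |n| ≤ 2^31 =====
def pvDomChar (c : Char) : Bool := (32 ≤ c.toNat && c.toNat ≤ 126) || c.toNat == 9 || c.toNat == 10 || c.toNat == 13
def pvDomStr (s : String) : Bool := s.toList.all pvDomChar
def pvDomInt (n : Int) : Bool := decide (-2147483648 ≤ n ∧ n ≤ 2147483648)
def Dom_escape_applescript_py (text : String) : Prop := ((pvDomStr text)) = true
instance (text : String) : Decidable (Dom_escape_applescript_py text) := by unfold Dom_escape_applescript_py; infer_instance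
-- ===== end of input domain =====

-- B replaces A's flush-accumulator state machine with a two-pointer maximal-literal-span scan; same cost, different structure.


-- ===== PORT A =====
-- the `replacements` dict of A
def pvReplA : PySem.Dict Char String :=
  PySem.Dict.ofList [('"', "quote"), ('\\', "ASCII character 92"), ('{', "ASCII character 123"),
    ('}', "ASCII character 125"), ('\n', "ASCII character 10"), ('\r', "ASCII character 13"),
    ('\t', "ASCII character 9")]

-- A's flush_literal: state is (parts, literal)
def pvFlushA (parts : List String) (lit : List Char) : List String :=
  if lit.isEmpty then parts else parts ++ [String.ofList ('"' :: lit ++ ['"'])]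

-- A's loop body
def pvStepA (st : List String × List Char) (c : Char) : List String × List Char :=
  match PySem.Dict.get? pvReplA c with
  | some r => (pvFlushA st.1 st.2 ++ [r], [])
  | none =>
    if c.toNat < 32 then
      (pvFlushA st.1 st.2 ++ ["ASCII character " ++ PySem.Int.toStr (c.toNat : Int)], [])
    else (st.1, st.2 ++ [c])

def escape_applescript_py (text : String) : String :=
  if text = "" then "\"\""
  else
    let st := text.toList.foldl pvStepA ([], [])
    let parts := pvFlushA st.1 st.2
    if parts.isEmpty then "\"\"" else PySem.Str.join " & " parts

-- ===== PORT B =====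
-- B's `special` dict
def pvSpecialB : PySem.Dict Char String :=
  PySem.Dict.ofList [('"', "quote"), ('\\', "ASCII character 92"), ('{', "ASCII character 123"),
    ('}', "ASCII character 125"), ('\n', "ASCII character 10"), ('\r', "ASCII character 13"),
    ('\t', "ASCII character 9")]

-- B's inner-while condition: text[j] not in special and ord(text[j]) >= 32
def pvIsLitB (c : Char) : Bool := !(PySem.Dict.contains pvSpecialB c) && decide (32 ≤ c.toNat)

-- B's outer while over the remaining suffix; the literal branch consumes the whole span at once
def pvLoopB : List Char → List String
  | [] => []
  | c :: cs =>
    match PySem.Dict.get? pvSpecialB c with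
    | some r => r :: pvLoopB cs
    | none =>
      if c.toNat < 32 then ("ASCII character " ++ PySem.Int.toStr (c.toNat : Int)) :: pvLoopB cs
      else String.ofList ('"' :: (c :: cs.takeWhile pvIsLitB) ++ ['"']) :: pvLoopB (cs.dropWhile pvIsLitB)
  termination_by l => l.length
  decreasing_by
    all_goals simp
    have := List.Sublist.length_le (List.dropWhile_sublist (p := pvIsLitB) (l := cs))
    omega

def escape_applescript_py_alt (text : String) : String :=
  let parts := pvLoopB text.toList
  if parts.isEmpty then "\"\"" else PySem.Str.join " & " parts

-- ===== PRECONDITION & SPEC =====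
def Spec_escape_applescript_py (text : String) (out : String) : Prop := out = escape_applescript_py_alt text
instance (text : String) (out : String) : Decidable (Spec_escape_applescript_py text out) := by unfold Spec_escape_applescript_py; infer_instance

-- ===== CLAIM (what is proved, stated in full; the proofs are below) =====
def Claim_equal_escape_applescript_py : Prop := ∀ (text : String), Dom_escape_applescript_py text → Spec_escape_applescript_py text (escape_applescript_py text)

-- ===== LEMMAS AND PROOFS =====
-- quoted chunk from a (possibly empty) literal buffer
def pvQ (lit : List Char) : List String :=
  if lit.isEmpty then [] else [String.ofList ('"' :: lit ++ ['"'])]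

-- abstract form of A's remaining computation given pending literal buffer `lit`
def pvG : List Char → List Char → List String
  | lit, [] => pvQ lit
  | lit, c :: cs =>
    match PySem.Dict.get? pvReplA c with
    | some r => pvQ lit ++ r :: pvG [] cs
    | none =>
      if c.toNat < 32 then pvQ lit ++ ("ASCII character " ++ PySem.Int.toStr (c.toNat : Int)) :: pvG [] cs
      else pvG (lit ++ [c]) cs

theorem pvFlushA_eq (parts : List String) (lit : List Char) :
    pvFlushA parts lit = parts ++ pvQ lit := by
  unfold pvFlushA pvQ; split <;> simp

theorem pvSpecialB_eq : pvSpecialB = pvReplA := rfl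

theorem pvIsLitB_eq (c : Char) :
    pvIsLitB c = ((PySem.Dict.get? pvReplA c).isNone && decide (32 ≤ c.toNat)) := by
  simp [pvIsLitB, pvSpecialB_eq, PySem.Dict.contains_eq_isSome_get?]

-- A's fold, flushed, computes pvG
theorem pvFold_eq (cs : List Char) : ∀ (parts : List String) (lit : List Char),
    pvFlushA (cs.foldl pvStepA (parts, lit)).1 (cs.foldl pvStepA (parts, lit)).2
      = parts ++ pvG lit cs := by
  induction cs with
  | nil => intro parts lit; simp [pvG, pvFlushA_eq]
  | cons c cs ih =>
    intro parts lit
    cases h : PySem.Dict.get? pvReplA c with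
    | some r =>
      simp only [List.foldl_cons, pvStepA, h, pvG, ih, pvFlushA_eq]
      simp
    | none =>
      by_cases h2 : c.toNat < 32
      · simp only [List.foldl_cons, pvStepA, h, if_pos h2, pvG, ih, pvFlushA_eq]
        simp
      · simp only [List.foldl_cons, pvStepA, h, if_neg h2, pvG, ih]

-- one step of B's loop in takeWhile/dropWhile form
theorem pvLoopB_nil : pvLoopB [] = [] := by rw [pvLoopB.eq_def]

theorem pvLoopB_span (cs : List Char) :
    pvLoopB cs = pvQ (cs.takeWhile pvIsLitB) ++ pvLoopB (cs.dropWhile pvIsLitB) := by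
  cases cs with
  | nil => simp [pvLoopB_nil, pvQ]
  | cons c cs =>
    cases h : PySem.Dict.get? pvReplA c with
    | some r =>
      have hl : pvIsLitB c = false := by simp [pvIsLitB_eq, h]
      simp [List.dropWhile_cons, hl, pvQ]
    | none =>
      by_cases h2 : c.toNat < 32
      · have hl : pvIsLitB c = false := by simp [pvIsLitB_eq, h]; omega
        simp [List.dropWhile_cons, hl, pvQ]
      · have hl : pvIsLitB c = true := by simp [pvIsLitB_eq, h]; omega
        rw [pvLoopB.eq_def]
        simp [pvSpecialB_eq, h, if_neg h2, List.dropWhile_cons, hl, pvQ]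

theorem pvG_eq (cs : List Char) : ∀ (lit : List Char),
    pvG lit cs = pvQ (lit ++ cs.takeWhile pvIsLitB) ++ pvLoopB (cs.dropWhile pvIsLitB) := by
  induction cs with
  | nil => intro lit; simp [pvLoopB_nil, pvG]
  | cons c cs ih =>
    intro lit
    cases h : PySem.Dict.get? pvReplA c with
    | some r =>
      have hl : pvIsLitB c = false := by simp [pvIsLitB_eq, h]
      have hB : pvLoopB (c :: cs) = r :: pvLoopB cs := by
        rw [pvLoopB.eq_def]; simp [pvSpecialB_eq, h]
      simp only [pvG, h, ih, List.nil_append]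
      rw [← pvLoopB_span]
      simp [hl, hB]
    | none =>
      by_cases h2 : c.toNat < 32
      · have hl : pvIsLitB c = false := by simp [pvIsLitB_eq, h]; omega
        have hB : pvLoopB (c :: cs) =
            ("ASCII character " ++ PySem.Int.toStr (c.toNat : Int)) :: pvLoopB cs := by
          rw [pvLoopB.eq_def]; simp [pvSpecialB_eq, h, if_pos h2]
        simp only [pvG, h, if_pos h2, ih, List.nil_append]
        rw [← pvLoopB_span]
        simp [hl, hB]
      · have hl : pvIsLitB c = true := by simp [pvIsLitB_eq, h]; omega
        simp only [pvG, h, if_neg h2, ih]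
        simp [hl]

theorem pvParts_eq (l : List Char) :
    pvFlushA (l.foldl pvStepA ([], [])).1 (l.foldl pvStepA ([], [])).2 = pvLoopB l := by
  rw [pvFold_eq, pvG_eq]
  simp only [List.nil_append]
  rw [← pvLoopB_span]

-- ===== VERDICT (by name: the statement is the Claim_ definition above) =====
theorem escape_applescript_py_spec : Claim_equal_escape_applescript_py := by
  intro text _
  unfold Spec_escape_applescript_py escape_applescript_py escape_applescript_py_alt
  by_cases h : text = ""
  · subst h
    simp [pvLoopB_nil]
  · simp only [if_neg h, pvParts_eq]
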